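-- pv_equiv track=rewrite | github.com/AIT-IES/PESTO | PESTO-master/server.py | Ports_and_IPs
-- ===== SOURCE A (Python) =====
-- def Ports_and_IPs(VMs, number_of_users, startingPort):
--     """
--     creates two lists, IPs and Ports
--     """
--
--     Ports = []
--     IPs = []
--     port = startingPort
--     for VM in VMs:
--         for i in range(number_of_users):
--             Ports.append(port)
--             IPs.append(VM)
--             port = port + 1
--     return IPs, Ports
-- ===== SOURCE B (Python) =====
-- def Ports_and_IPs(VMs, number_of_users, startingPort):
--     """
--     creates two lists, IPs and Ports
--     """
--     vms = list(VMs)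
--     IPs = []
--     Ports = []
--
--     def build(lo, hi, port):
--         # appends the blocks for vms[lo:hi] to IPs/Ports; the slice's first port is `port`
--         if hi - lo <= 0:
--             return
--         if hi - lo == 1:
--             IPs.extend([vms[lo]] * number_of_users)
--             Ports.extend(range(port, port + number_of_users))
--             return
--         mid = (lo + hi) // 2
--         build(lo, mid, port)
--         build(mid, hi, port + (mid - lo) * number_of_users)
--
--     build(0, len(vms), startingPort)
--     return IPs, Ports
-- ===== Notes on version B (the rewrite author's own statement) =====
-- stated objective: alternative
-- what changed: Replaces the fused sequential nested loop with a mutable port counter by a divide-and-conquer recursion that splits the VM index range at its midpoint, computes each half's starting port arithmetically, and extends shared IPs/Ports accumulators with whole per-VM blocks ([vm]*m and a range).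
import Mathlib
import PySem

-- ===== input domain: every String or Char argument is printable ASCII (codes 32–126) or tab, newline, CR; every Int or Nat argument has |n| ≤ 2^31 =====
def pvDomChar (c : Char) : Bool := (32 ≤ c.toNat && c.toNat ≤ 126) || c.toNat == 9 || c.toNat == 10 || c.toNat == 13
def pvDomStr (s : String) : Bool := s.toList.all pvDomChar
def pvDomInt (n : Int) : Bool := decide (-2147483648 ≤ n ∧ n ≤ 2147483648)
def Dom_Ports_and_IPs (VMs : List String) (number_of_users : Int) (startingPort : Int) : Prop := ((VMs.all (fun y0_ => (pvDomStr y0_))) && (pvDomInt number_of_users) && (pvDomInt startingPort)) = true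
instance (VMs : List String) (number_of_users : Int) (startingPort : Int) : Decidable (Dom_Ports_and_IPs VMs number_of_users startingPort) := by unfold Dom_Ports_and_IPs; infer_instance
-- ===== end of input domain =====

-- B replaces A's fused nested loop with a mutable port counter by a divide-and-conquer
-- recursion over the VM list: each half's port block start is computed by arithmetic
-- (objective: alternative decomposition, same cost).

-- ===== PORT A =====
-- Fused nested loop: state (Ports, IPs, port), appended per inner iteration.
def Ports_and_IPs (VMs : List String) (number_of_users : Int) (startingPort : Int) : List String × List Int :=
  let st := VMs.foldl (fun (st : List Int × List String × Int) VM =>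
      (PySem.List.pyRange 0 number_of_users 1).foldl
        (fun st _i => (st.1 ++ [st.2.2], st.2.1 ++ [VM], st.2.2 + 1)) st)
    ([], [], startingPort)
  (st.2.1, st.1)

-- ===== PORT B =====
-- B's recursive helper build(lo, hi, port) over indices is rendered as recursion on the
-- vms[lo:hi] sublist (take/drop at mid); [v]*m is List.replicate m.toNat v, range is pyRange.
-- (structural recursion on a length fuel, so the kernel can reduce it; the fuel only
-- makes the same computation total and vms.length always suffices; the accumulator pair
-- is Python's shared IPs/Ports lists, extended in place)
def pvBuild : Nat → List String → Int → Int → List String × List Int → List String × List Int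
  | 0, _, _, _, acc => acc
  | fuel + 1, vms, m, port, acc =>
    if vms.length = 0 then acc
    else if vms.length = 1 then
      (acc.1 ++ List.replicate m.toNat vms.headI,
       acc.2 ++ PySem.List.pyRange port (port + m) 1)
    else
      pvBuild fuel (vms.drop (vms.length / 2)) m (port + ((vms.length / 2 : Nat) : Int) * m)
        (pvBuild fuel (vms.take (vms.length / 2)) m port acc)

def Ports_and_IPs_alt (VMs : List String) (number_of_users : Int) (startingPort : Int) : List String × List Int :=
  pvBuild VMs.length VMs number_of_users startingPort ([], [])

-- ===== PRECONDITION & SPEC =====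
def Spec_Ports_and_IPs (VMs : List String) (number_of_users : Int) (startingPort : Int) (out : List String × List Int) : Prop := out = Ports_and_IPs_alt VMs number_of_users startingPort
instance (VMs : List String) (number_of_users : Int) (startingPort : Int) (out : List String × List Int) : Decidable (Spec_Ports_and_IPs VMs number_of_users startingPort out) := by unfold Spec_Ports_and_IPs; infer_instance

-- ===== CLAIM (what is proved, stated in full; the proofs are below) =====
def Claim_equal_Ports_and_IPs : Prop := ∀ (VMs : List String) (number_of_users : Int) (startingPort : Int), Dom_Ports_and_IPs VMs number_of_users startingPort → Spec_Ports_and_IPs VMs number_of_users startingPort (Ports_and_IPs VMs number_of_users startingPort)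

-- ===== LEMMAS AND PROOFS =====

-- Both sides normalise to this flat form.
def pvFlat (vms : List String) (m : Int) (p : Int) : List String × List Int :=
  (vms.flatMap (fun v => List.replicate m.toNat v),
   PySem.List.pyRange p (p + ((vms.length * m.toNat : Nat) : Int)) 1)

lemma length_pyRange_one (p m : Int) : (PySem.List.pyRange p (p + m) 1).length = m.toNat := by
  simp [PySem.List.pyRange]; omega

lemma map_const_pyRange (m : Int) (v : String) :
    (PySem.List.pyRange 0 m 1).map (fun _ => v) = List.replicate m.toNat v := by
  have h := length_pyRange_one 0 m
  simp only [zero_add] at h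
  rw [List.map_const', h]

-- Invariant for A's inner loop (generic over the iterated list, whose values are unused).
lemma inner_fold_generic (l : List Int) (VM : String) (P : List Int) (I : List String) (p : Int) :
    l.foldl
      (fun (st : List Int × List String × Int) _i => (st.1 ++ [st.2.2], st.2.1 ++ [VM], st.2.2 + 1))
      (P, I, p)
    = (P ++ PySem.List.pyRange p (p + l.length) 1,
       I ++ l.map (fun _ => VM),
       p + l.length) := by
  induction l generalizing P I p with
  | nil => simp [PySem.List.pyRange_one_eq_nil (le_refl p)]
  | cons a t ih =>
    simp only [List.foldl_cons, List.map_cons, List.length_cons, ih]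
    have h1 : p < p + ((t.length : Int) + 1) := by omega
    rw [show ((t.length + 1 : Nat) : Int) = (t.length : Int) + 1 by push_cast; ring,
        PySem.List.pyRange_one_cons h1]
    have h2 : p + 1 + (t.length : Int) = p + ((t.length : Int) + 1) := by ring
    simp [h2]

lemma outer_loop_eq (VMs : List String) (n : Int) (P : List Int) (I : List String) (p : Int) :
    VMs.foldl (fun (st : List Int × List String × Int) VM =>
      (PySem.List.pyRange 0 n 1).foldl
        (fun st _i => (st.1 ++ [st.2.2], st.2.1 ++ [VM], st.2.2 + 1)) st) (P, I, p)
    = (P ++ (pvFlat VMs n p).2, I ++ (pvFlat VMs n p).1, p + ((VMs.length * n.toNat : Nat) : Int)) := by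
  induction VMs generalizing P I p with
  | nil => simp [pvFlat, PySem.List.pyRange_one_eq_nil (le_refl p)]
  | cons v t ih =>
    simp only [List.foldl_cons, inner_fold_generic, ih, pvFlat, List.flatMap_cons,
      List.length_cons, map_const_pyRange]
    have hk : ((PySem.List.pyRange 0 n 1).length : Int) = (n.toNat : Int) := by
      have := length_pyRange_one 0 n; simp only [zero_add] at this; exact_mod_cast this
    rw [hk]
    have harith : p + (n.toNat : Int) + ((t.length * n.toNat : Nat) : Int)
        = p + (((t.length + 1) * n.toNat : Nat) : Int) := by push_cast; ring
    simp only [harith, List.append_assoc]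
    rw [PySem.List.pyRange_one_append p (p + (n.toNat : Int))
      (p + (((t.length + 1) * n.toNat : Nat) : Int)) (by omega)
      (by push_cast; nlinarith [Nat.zero_le n.toNat])]

lemma pvBuild_eq_flat (fuel : Nat) (vms : List String) (m p : Int)
    (acc : List String × List Int) (hfuel : vms.length ≤ fuel) :
    pvBuild fuel vms m p acc = (acc.1 ++ (pvFlat vms m p).1, acc.2 ++ (pvFlat vms m p).2) := by
  induction fuel generalizing vms p acc with
  | zero =>
    rw [List.length_eq_zero_iff.mp (Nat.le_zero.mp hfuel)]
    simp [pvBuild, pvFlat, PySem.List.pyRange_one_eq_nil (le_refl p)]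
  | succ fuel ih =>
    by_cases h0 : vms.length = 0
    · rw [List.length_eq_zero_iff.mp h0]
      simp [pvBuild, pvFlat, PySem.List.pyRange_one_eq_nil (le_refl p)]
    · by_cases h1 : vms.length = 1
      · obtain ⟨v, hv⟩ := List.length_eq_one_iff.mp h1
        subst hv
        rcases le_or_gt 0 m with hm | hm
        · rw [pvBuild]
          simp [pvFlat, Int.toNat_of_nonneg hm]
        · rw [pvBuild]
          simp [pvFlat, PySem.List.pyRange_one_eq_nil (show p + m ≤ p by omega),
            Int.toNat_of_nonpos (le_of_lt hm)]
      · rw [pvBuild]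
        simp only [if_neg h0, if_neg h1]
        have hlt : vms.length / 2 < vms.length := by omega
        have hpos : 1 ≤ vms.length / 2 := by omega
        set mid := vms.length / 2 with hmid
        rw [ih (vms.take mid) p acc (by simp only [List.length_take]; omega)]
        rw [ih (vms.drop mid) (p + (mid : Int) * m) _ (by simp only [List.length_drop]; omega)]
        simp only [pvFlat, List.length_take, List.length_drop, min_eq_left (le_of_lt hlt),
          Prod.mk.injEq, List.append_assoc, List.append_right_inj]
        constructor
        · rw [← List.flatMap_append, List.take_append_drop]
        · have hsplit : p + ((mid * m.toNat : Nat) : Int) + (((vms.length - mid) * m.toNat : Nat) : Int)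
              = p + ((vms.length * m.toNat : Nat) : Int) := by
            push_cast [Nat.sub_mul, Nat.mul_le_mul_right m.toNat (le_of_lt hlt)]
            ring
          have hle : mid * m.toNat ≤ vms.length * m.toNat := Nat.mul_le_mul_right _ (le_of_lt hlt)
          rcases le_or_gt 0 m with hm | hm
          · have hmm : (mid : Int) * m = ((mid * m.toNat : Nat) : Int) := by
              push_cast [Int.toNat_of_nonneg hm]; ring
            rw [hmm, hsplit]
            exact (PySem.List.pyRange_one_append p (p + ((mid * m.toNat : Nat) : Int))
              (p + ((vms.length * m.toNat : Nat) : Int)) (by omega) (by omega)).symm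
          · have hz : m.toNat = 0 := by omega
            simp [hz]

-- ===== VERDICT (by name: the statement is the Claim_ definition above) =====
theorem Ports_and_IPs_spec : Claim_equal_Ports_and_IPs := by
  intro VMs n p _
  unfold Spec_Ports_and_IPs Ports_and_IPs Ports_and_IPs_alt
  rw [pvBuild_eq_flat VMs.length VMs n p ([], []) (le_refl _), outer_loop_eq]
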